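-- pv_equiv track=rewrite | github.com/JeodC/PKsinew | src/achievements.py | _calc_level_from_exp
-- ===== SOURCE A (Python) =====
-- def _calc_level_from_exp(species_id, exp):
--     """Calculate level from experience points (simplified)"""
--     # Most Pokemon use medium-slow or medium-fast growth
--     # This is a simplified calculation
--
--     # Growth rate exp tables (up to level 100)
--     # Using medium-slow as default (most common for mythicals)
--     medium_slow = [
--         0, 9, 57, 96, 135, 179, 236, 314, 419, 560, 742, 973, 1261,
--         1612, 2035, 2535, 3120, 3798, 4575, 5460, 6458, 7577, 8825,
--         10208, 11735, 13411, 15244, 17242, 19411, 21760, 24294, 27021,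
--         29949, 33084, 36435, 40007, 43808, 47846, 52127, 56660, 61450,
--         66505, 71833, 77440, 83335, 89523, 96012, 102810, 109923, 117360,
--         125126, 133229, 141677, 150476, 159635, 169159, 179056, 189334,
--         199999, 211060, 222522, 234393, 246681, 259392, 272535, 286115,
--         300140, 314618, 329555, 344960, 360838, 377197, 394045, 411388,
--         429235, 447591, 466464, 485862, 505791, 526260, 547274, 568841,
--         590969, 613664, 636935, 660787, 685228, 710266, 735907, 762160,
--         789030, 816525, 844653, 873420, 902835, 932903, 963632, 995030,
--         1027103, 1059860
--     ]
--
--     for level in range(100, 0, -1):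
--         if exp >= medium_slow[level - 1]:
--             return level
--     return 1
-- ===== SOURCE B (Python) =====
-- def _calc_level_from_exp(species_id, exp):
--     """Calculate level from experience points (simplified)"""
--     # The medium-slow table is exactly floor((6n^3 - 75n^2 + 500n - 700)/5)
--     # for levels n >= 2, and 0 for n = 1, so compute thresholds on demand
--     # and binary-search for the highest level whose threshold is <= exp.
--     def threshold(n):
--         return 0 if n == 1 else (6 * n ** 3 - 75 * n ** 2 + 500 * n - 700) // 5
--
--     lo, hi = 1, 100
--     while lo < hi:
--         mid = (lo + hi + 1) // 2
--         if exp >= threshold(mid):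
--             lo = mid
--         else:
--             hi = mid - 1
--     return lo
-- ===== Notes on version B (the rewrite author's own statement) =====
-- stated objective: alternative
-- what changed: Drops the 100-entry exp table entirely: the table equals the medium-slow cubic closed form floor((6n^3-75n^2+500n-700)/5) (0 at n=1), and B binary-searches levels 1..100 against that formula instead of A's descending linear scan of the table.
import Mathlib
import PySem

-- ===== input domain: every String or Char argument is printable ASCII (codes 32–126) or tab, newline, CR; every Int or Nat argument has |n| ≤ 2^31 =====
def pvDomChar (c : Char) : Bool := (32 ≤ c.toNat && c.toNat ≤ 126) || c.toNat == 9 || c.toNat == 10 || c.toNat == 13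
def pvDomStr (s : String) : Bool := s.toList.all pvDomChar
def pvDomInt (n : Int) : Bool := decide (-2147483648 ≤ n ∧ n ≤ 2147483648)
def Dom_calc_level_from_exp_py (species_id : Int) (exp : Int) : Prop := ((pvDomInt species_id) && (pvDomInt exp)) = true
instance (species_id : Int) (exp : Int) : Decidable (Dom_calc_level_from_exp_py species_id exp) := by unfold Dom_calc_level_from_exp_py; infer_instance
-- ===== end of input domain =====

-- B drops A's 100-entry exp table: the table equals the medium-slow cubic closed form
-- floor((6n^3-75n^2+500n-700)/5) (0 at n=1), and B binary-searches levels 1..100 against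
-- that formula instead of A's descending linear scan over the table.

-- ===== PORT A =====
-- A's hard-coded medium_slow exp table
def pvMediumSlow : List Int :=
  [0, 9, 57, 96, 135, 179, 236, 314, 419, 560, 742, 973, 1261,
   1612, 2035, 2535, 3120, 3798, 4575, 5460, 6458, 7577, 8825,
   10208, 11735, 13411, 15244, 17242, 19411, 21760, 24294, 27021,
   29949, 33084, 36435, 40007, 43808, 47846, 52127, 56660, 61450,
   66505, 71833, 77440, 83335, 89523, 96012, 102810, 109923, 117360,
   125126, 133229, 141677, 150476, 159635, 169159, 179056, 189334,
   199999, 211060, 222522, 234393, 246681, 259392, 272535, 286115,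
   300140, 314618, 329555, 344960, 360838, 377197, 394045, 411388,
   429235, 447591, 466464, 485862, 505791, 526260, 547274, 568841,
   590969, 613664, 636935, 660787, 685228, 710266, 735907, 762160,
   789030, 816525, 844653, 873420, 902835, 932903, 963632, 995030,
   1027103, 1059860]

-- A's `for level in range(100, 0, -1): if exp >= medium_slow[level-1]: return level` / `return 1`.
-- Every level drawn from range(100,0,-1) has 0 ≤ level-1 < 100, so the index is always in range
-- and `.getD 0` is exact (Python never raises here).
def pvAGo (exp : Int) (ts : List Int) : List Int → Int
  | [] => 1
  | l :: ls => if exp ≥ (PySem.List.pyGet? ts (l - 1)).getD 0 then l else pvAGo exp ts ls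

def calc_level_from_exp_py (species_id : Int) (exp : Int) : Int :=
  pvAGo exp pvMediumSlow (PySem.List.pyRange 100 0 (-1))

-- ===== PORT B =====
-- B's `threshold(n) = 0 if n == 1 else (6*n**3 - 75*n**2 + 500*n - 700) // 5`
def pvThreshold (n : Int) : Int :=
  if n = 1 then 0 else PySem.Int.floordiv (6 * n ^ 3 - 75 * n ^ 2 + 500 * n - 700) 5

-- B's `while lo < hi: mid = (lo+hi+1)//2; if exp >= threshold(mid): lo = mid else hi = mid-1`
def pvBS (exp lo hi : Int) : Int :=
  if h : lo < hi then
    let mid := PySem.Int.floordiv (lo + hi + 1) 2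
    if exp ≥ pvThreshold mid then pvBS exp mid hi else pvBS exp lo (mid - 1)
  else lo
termination_by (hi - lo).toNat
decreasing_by
  all_goals
    simp only [PySem.Int.floordiv_eq_ediv_of_pos (show (0:Int) < 2 by norm_num)] at *
    omega

def calc_level_from_exp_py_alt (species_id : Int) (exp : Int) : Int :=
  pvBS exp 1 100

-- ===== PRECONDITION & SPEC =====
def Spec_calc_level_from_exp_py (species_id : Int) (exp : Int) (out : Int) : Prop := out = calc_level_from_exp_py_alt species_id exp
instance (species_id : Int) (exp : Int) (out : Int) : Decidable (Spec_calc_level_from_exp_py species_id exp out) := by unfold Spec_calc_level_from_exp_py; infer_instance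

-- ===== CLAIM (what is proved, stated in full; the proofs are below) =====
def Claim_equal_calc_level_from_exp_py : Prop := ∀ (species_id : Int) (exp : Int), Dom_calc_level_from_exp_py species_id exp → Spec_calc_level_from_exp_py species_id exp (calc_level_from_exp_py species_id exp)

-- ===== LEMMAS AND PROOFS =====

-- both results satisfy this characterisation: r is the largest level in 1..100 whose
-- threshold is ≤ exp (or 1 when there is none)
def pvOk (exp r : Int) : Prop :=
  1 ≤ r ∧ r ≤ 100 ∧ (r = 1 ∨ pvThreshold r ≤ exp) ∧
    ∀ m : Int, r < m → m ≤ 100 → exp < pvThreshold m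

theorem pvOk_unique {exp r s : Int} (hr : pvOk exp r) (hs : pvOk exp s) : r = s := by
  obtain ⟨hr1, hr2, hr3, hr4⟩ := hr
  obtain ⟨hs1, hs2, hs3, hs4⟩ := hs
  by_contra hne
  rcases lt_or_gt_of_ne hne with h | h
  · have h1 := hr4 s h hs2
    rcases hs3 with h2 | h2 <;> omega
  · have h1 := hs4 r h hr2
    rcases hr3 with h2 | h2 <;> omega

-- the formula reproduces the table entry at every level (checked entry by entry)
theorem pvTable_eq_formula :
    (List.range 100).all
      (fun k => (PySem.List.pyGet? pvMediumSlow ((k : Int))).getD 0 == pvThreshold ((k : Int) + 1)) = true := by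
  decide

theorem pvBridge (n : Nat) (h : n < 100) :
    (PySem.List.pyGet? pvMediumSlow ((n : Int))).getD 0 = pvThreshold ((n : Int) + 1) := by
  have := List.all_eq_true.mp pvTable_eq_formula n (List.mem_range.mpr h)
  exact eq_of_beq this

theorem pvMediumSlow_sorted : List.Pairwise (· ≤ ·) pvMediumSlow := by decide

-- monotonicity of the threshold formula on 1..100, via the sortedness of the table
theorem pvThr_mono {a b : Int} (h1 : 1 ≤ a) (h2 : a ≤ b) (h3 : b ≤ 100) :
    pvThreshold a ≤ pvThreshold b := by
  rcases eq_or_lt_of_le h2 with rfl | hlt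
  · exact le_refl _
  · have ha : pvThreshold a = (PySem.List.pyGet? pvMediumSlow (((a - 1).toNat : Int))).getD 0 := by
      have := pvBridge (a - 1).toNat (by omega)
      rw [this]; congr 1; omega
    have hb : pvThreshold b = (PySem.List.pyGet? pvMediumSlow (((b - 1).toNat : Int))).getD 0 := by
      have := pvBridge (b - 1).toNat (by omega)
      rw [this]; congr 1; omega
    have hlen : pvMediumSlow.length = 100 := by decide
    have hbi : (b - 1).toNat < pvMediumSlow.length := by omega
    have hai : (a - 1).toNat < pvMediumSlow.length := by omega
    rw [ha, hb, PySem.List.pyGet?_natCast, PySem.List.pyGet?_natCast,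
      List.getElem?_eq_getElem hai, List.getElem?_eq_getElem hbi]
    exact (List.pairwise_iff_getElem.mp pvMediumSlow_sorted) _ _ hai hbi (by omega)

-- the descending level list [n, n-1, ..., 1]
def pvDesc : Nat → List Int
  | 0 => []
  | n + 1 => ((n : Int) + 1) :: pvDesc n

theorem pvRange_eq_desc : PySem.List.pyRange 100 0 (-1) = pvDesc 100 := by decide

-- A's descending scan satisfies the characterisation
theorem pvAGo_ok (exp : Int) :
    ∀ n : Nat, n ≤ 100 → (∀ m : Int, (n : Int) < m → m ≤ 100 → exp < pvThreshold m) →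
      pvOk exp (pvAGo exp pvMediumSlow (pvDesc n)) := by
  intro n
  induction n with
  | zero =>
    intro _ hyp
    simp only [pvDesc, pvAGo]
    exact ⟨le_refl 1, by omega, Or.inl rfl, fun m hm h100 => hyp m (by omega) h100⟩
  | succ k ih =>
    intro hle hyp
    have hidx : ((k : Int) + 1) - 1 = ((k : Int)) := by ring
    have hg : (PySem.List.pyGet? pvMediumSlow (((k : Int) + 1) - 1)).getD 0
        = pvThreshold ((k : Int) + 1) := by rw [hidx]; exact pvBridge k (by omega)
    simp only [pvDesc, pvAGo, hg]
    split
    · rename_i hge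
      refine ⟨by omega, by omega, Or.inr (by omega), ?_⟩
      intro m hm h100
      exact hyp m (by push_cast; omega) h100
    · rename_i hlt
      refine ih (by omega) ?_
      intro m hm h100
      by_cases hmeq : m = (k : Int) + 1
      · subst hmeq; omega
      · exact hyp m (by push_cast at hm ⊢; omega) h100

-- B's binary search satisfies the characterisation
theorem pvBS_ok (exp : Int) :
    ∀ (k : Nat) (lo hi : Int), (hi - lo).toNat ≤ k →
      1 ≤ lo → lo ≤ hi → hi ≤ 100 → (lo = 1 ∨ pvThreshold lo ≤ exp) →
      (∀ m : Int, hi < m → m ≤ 100 → exp < pvThreshold m) →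
      pvOk exp (pvBS exp lo hi) := by
  intro k
  induction k with
  | zero =>
    intro lo hi hk h1 h2 h3 h4 h5
    have heq : lo = hi := by omega
    rw [pvBS, dif_neg (by omega)]
    exact ⟨h1, by omega, h4, fun m hm h100 => h5 m (by omega) h100⟩
  | succ k ih =>
    intro lo hi hk h1 h2 h3 h4 h5
    by_cases hlt : lo < hi
    · rw [pvBS, dif_pos hlt]
      have hmid : PySem.Int.floordiv (lo + hi + 1) 2 = (lo + hi + 1) / 2 :=
        PySem.Int.floordiv_eq_ediv_of_pos (by norm_num)
      simp only [hmid]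
      have hb1 : lo < (lo + hi + 1) / 2 := by omega
      have hb2 : (lo + hi + 1) / 2 ≤ hi := by omega
      split
      · rename_i hge
        exact ih _ hi (by omega) (by omega) hb2 h3 (Or.inr (by omega)) h5
      · rename_i hng
        refine ih lo ((lo + hi + 1) / 2 - 1) (by omega) h1 (by omega) (by omega) h4 ?_
        intro m hm h100
        by_cases hmh : m ≤ hi
        · have : pvThreshold ((lo + hi + 1) / 2) ≤ pvThreshold m :=
            pvThr_mono (by omega) (by omega) h100
          omega
        · exact h5 m (by omega) h100
    · rw [pvBS, dif_neg hlt]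
      exact ⟨h1, by omega, h4, fun m hm h100 => h5 m (by omega) h100⟩

-- ===== VERDICT (by name: the statement is the Claim_ definition above) =====
theorem calc_level_from_exp_py_spec : Claim_equal_calc_level_from_exp_py := by
  intro species_id exp _
  unfold Spec_calc_level_from_exp_py calc_level_from_exp_py calc_level_from_exp_py_alt
  rw [pvRange_eq_desc]
  exact pvOk_unique
    (pvAGo_ok exp 100 (le_refl _) (fun m hm h100 => by omega))
    (pvBS_ok exp 99 1 100 (by norm_num) (by norm_num) (by norm_num) (by norm_num)
      (Or.inl rfl) (fun m hm h100 => by omega))
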